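-- pv_equiv track=rewrite | github.com/albaq77/GenerateDFG | BBVarDFG.py | build_variable_graph
-- ===== SOURCE A (Python) =====
-- from collections import defaultdict, deque
--
-- def build_variable_graph(bb_vars, exec_sequence):
--     """构建变量访问图并计算权重"""
--     edge_weights = defaultdict(int)
--     last_vars = []
--
--     for bb in exec_sequence:
--         current_vars = bb_vars.get(bb, [])
--         if not current_vars:
--             continue
--
--         # 处理跨BB的变量依赖
--         if last_vars:
--             for src in last_vars:
--                 for dest in current_vars:
--                     edge_weights[(src, dest)] += 1
--
--         # 处理BB内部的顺序依赖
--         for i in range(1, len(current_vars)):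
--             edge_weights[(current_vars[i-1], current_vars[i])] += 1
--
--         last_vars = current_vars[-1:]  # 只保留最后一个变量建立跨BB连接
--
--     return edge_weights
-- ===== SOURCE B (Python) =====
-- from collections import defaultdict, Counter
--
-- def build_variable_graph(bb_vars, exec_sequence):
--     """Divide and conquer: split the non-empty block list in half, solve each half
--     to a Counter, and merge left + boundary cross-edges + right (Counter addition
--     keeps first-occurrence key order, so the dict comes out identical to a sweep)."""
--     blocks = [b for b in (bb_vars.get(bb, []) for bb in exec_sequence) if b]
--
--     def solve(lo, hi):
--         # Counter of all edges generated inside blocks[lo:hi]  (hi > lo)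
--         if hi - lo == 1:
--             cur = blocks[lo]
--             return Counter(zip(cur, cur[1:]))
--         mid = (lo + hi) // 2
--         left = solve(lo, mid)
--         left.update((blocks[mid - 1][-1], dest) for dest in blocks[mid])
--         left.update(solve(mid, hi))
--         return left
--
--     out = defaultdict(int)
--     if blocks:
--         out.update(solve(0, len(blocks)))
--     return out
-- ===== Notes on version B (the rewrite author's own statement) =====
-- stated objective: alternative
-- what changed: Replaces A's single forward stateful sweep (carrying last_vars and incrementing one shared dict) with a divide-and-conquer over the non-empty block list: each half is solved recursively to its own Counter and the halves are merged together with the boundary cross-edges by Counter addition, which preserves first-occurrence key order.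
import Mathlib
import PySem

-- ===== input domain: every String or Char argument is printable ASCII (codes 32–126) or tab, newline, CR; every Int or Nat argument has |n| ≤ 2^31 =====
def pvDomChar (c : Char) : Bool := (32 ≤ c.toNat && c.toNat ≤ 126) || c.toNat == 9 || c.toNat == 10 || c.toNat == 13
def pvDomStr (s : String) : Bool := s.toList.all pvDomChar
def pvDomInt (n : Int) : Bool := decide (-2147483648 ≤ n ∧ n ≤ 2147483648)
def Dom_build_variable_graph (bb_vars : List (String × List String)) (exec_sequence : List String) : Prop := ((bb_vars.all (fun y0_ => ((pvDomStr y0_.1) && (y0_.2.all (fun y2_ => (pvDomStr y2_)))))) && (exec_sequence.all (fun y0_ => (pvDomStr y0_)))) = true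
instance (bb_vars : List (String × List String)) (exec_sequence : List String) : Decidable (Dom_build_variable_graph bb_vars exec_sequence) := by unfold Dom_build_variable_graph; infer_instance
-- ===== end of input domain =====

-- B replaces A's forward stateful sweep by divide and conquer over the non-empty block list,
-- merging per-half Counters with the boundary cross-edges; same return value (neither mutates its input).

-- ===== PORT A =====
-- edge_weights[(src, dest)] += 1 on a defaultdict(int)
def pvInc (d : PySem.Dict (String × String) Int) (e : String × String) : PySem.Dict (String × String) Int :=
  d.modify e 0 (· + 1)

-- one iteration of A's 'for bb in exec_sequence' loop; state = (edge_weights, last_vars)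
def pvStepA (bb_vars : List (String × List String))
    (st : PySem.Dict (String × String) Int × List String) (bb : String) :
    PySem.Dict (String × String) Int × List String :=
  let current := (PySem.Dict.mk bb_vars).getD bb []       -- bb_vars.get(bb, [])
  if current.isEmpty then st                               -- if not current_vars: continue
  else
    let d := st.1
    -- if last_vars: for src in last_vars: for dest in current_vars: += 1
    let d := if st.2.isEmpty then d
             else st.2.foldl (fun d src => current.foldl (fun d dest => pvInc d (src, dest)) d) d
    -- for i in range(1, len(current_vars)): += 1   (indices always in range, so the default is never used)
    let d := (PySem.List.pyRange 1 (current.length) 1).foldl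
               (fun d i => pvInc d (PySem.List.pyGetD current (i - 1) "", PySem.List.pyGetD current i "")) d
    (d, PySem.List.slice current (some (-1)) none)         -- last_vars = current_vars[-1:]

def build_variable_graph (bb_vars : List (String × List String)) (exec_sequence : List String) : List (String × String × Int) :=
  let res := exec_sequence.foldl (pvStepA bb_vars) (PySem.Dict.empty, [])
  res.1.items.map (fun p => (p.1.1, p.1.2, p.2))

-- ===== PORT B =====
-- left.update(counter): Counter.update with a Counter adds counts key by key (new keys append)
def pvAdd (d c : PySem.Dict (String × String) Int) : PySem.Dict (String × String) Int :=
  c.items.foldl (fun d p => d.modify p.1 0 (· + p.2)) d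

-- solve(lo, hi): Counter of all edges generated inside blocks[lo:hi]; only ever called with hi > lo
-- (indices are in range and non-negative, so List.getD is exact for the Python indexing)
def pvSolve (blocks : List (List String)) (lo hi : Nat) : PySem.Dict (String × String) Int :=
  if _h : hi ≤ lo + 1 then
    -- if hi - lo == 1: return Counter(zip(cur, cur[1:]))
    let cur := blocks.getD lo []
    PySem.Dict.counter (cur.zip cur.tail)
  else
    let mid := (lo + hi) / 2
    let left := pvSolve blocks lo mid
    -- left.update((blocks[mid-1][-1], dest) for dest in blocks[mid]): each edge adds 1
    let left := ((blocks.getD mid []).map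
        (fun dest => (PySem.List.pyGetD (blocks.getD (mid - 1) []) (-1) "", dest))).foldl
        (fun d e => d.modify e 0 (· + 1)) left
    -- left.update(solve(mid, hi))
    pvAdd left (pvSolve blocks mid hi)
  termination_by hi - lo
  decreasing_by all_goals omega

def build_variable_graph_alt (bb_vars : List (String × List String)) (exec_sequence : List String) : List (String × String × Int) :=
  -- blocks = [b for b in (bb_vars.get(bb, []) for bb in exec_sequence) if b]
  let blocks := (exec_sequence.map (fun bb => (PySem.Dict.mk bb_vars).getD bb [])).filter (fun b => !b.isEmpty)
  -- out = defaultdict(int); if blocks: out.update(solve(0, len(blocks)))   (dict.update = insert each pair)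
  let out : PySem.Dict (String × String) Int :=
    if blocks.isEmpty then PySem.Dict.empty
    else (pvSolve blocks 0 blocks.length).items.foldl (fun d p => d.insert p.1 p.2) PySem.Dict.empty
  out.items.map (fun p => (p.1.1, p.1.2, p.2))

-- ===== PRECONDITION & SPEC =====
def Spec_build_variable_graph (bb_vars : List (String × List String)) (exec_sequence : List String) (out : List (String × String × Int)) : Prop := out = build_variable_graph_alt bb_vars exec_sequence
instance (bb_vars : List (String × List String)) (exec_sequence : List String) (out : List (String × String × Int)) : Decidable (Spec_build_variable_graph bb_vars exec_sequence out) := by unfold Spec_build_variable_graph; infer_instance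

-- ===== CLAIM (what is proved, stated in full; the proofs are below) =====
def Claim_equal_build_variable_graph : Prop := ∀ (bb_vars : List (String × List String)) (exec_sequence : List String), Dom_build_variable_graph bb_vars exec_sequence → Spec_build_variable_graph bb_vars exec_sequence (build_variable_graph bb_vars exec_sequence)

-- ===== LEMMAS AND PROOFS =====

-- list(zip(xs, xs[1:])): the in-block chain edges
def pvChain (b : List String) : List (String × String) := b.zip b.tail

-- canonical edge stream emitted from a list of (non-empty) blocks, given the pending source variable
def pvStream (last : Option String) : List (List String) → List (String × String)
  | [] => []
  | b :: bs =>
      (match last with | none => [] | some s => b.map (fun t => (s, t))) ++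
      pvChain b ++ pvStream b.getLast? bs

-- the stream of a block segment with no incoming source
def pvStreamH : List (List String) → List (String × String)
  | [] => []
  | b :: bs => pvChain b ++ pvStream b.getLast? bs

-- counting a stream into a dict
def pvCnt (d : PySem.Dict (String × String) Int) (es : List (String × String)) : PySem.Dict (String × String) Int :=
  es.foldl pvInc d

theorem pvCnt_append (d : PySem.Dict (String × String) Int) (es fs : List (String × String)) :
    pvCnt d (es ++ fs) = pvCnt (pvCnt d es) fs := by
  simp [pvCnt, List.foldl_append]

theorem pvFoldlCongr {α β : Type} (l : List β) (f g : α → β → α) (a : α)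
    (h : ∀ acc x, f acc x = g acc x) : l.foldl f a = l.foldl g a := by
  induction l generalizing a with
  | nil => rfl
  | cons x t ih => simp only [List.foldl_cons, h]; exact ih _

-- Nat-indexed form of A's internal loop counts exactly the chain pairs
theorem pvNatChain (b : List String) (d : PySem.Dict (String × String) Int) :
    (List.range (b.length - 1)).foldl
      (fun d k => pvInc d (b.getD k "", b.getD (k + 1) "")) d = pvCnt d (pvChain b) := by
  induction b generalizing d with
  | nil => simp [pvCnt, pvChain]
  | cons x t ih =>
    cases t with
    | nil => simp [pvCnt, pvChain]
    | cons y t' =>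
      have hr : (x :: y :: t').length - 1 = ((y :: t').length - 1) + 1 := by
        simp
      rw [hr, List.range_succ_eq_map, List.foldl_cons, List.foldl_map]
      rw [pvFoldlCongr _ _ (fun d k => pvInc d ((y :: t').getD k "", (y :: t').getD (k + 1) "")) _ ?_]
      · rw [ih]
        simp [pvCnt, pvChain]
      · intro acc k
        simp

-- A's index loop over pyRange 1 len counts exactly the chain pairs
theorem pvIndexLoop_eq_chain (b : List String) (d : PySem.Dict (String × String) Int) :
    (PySem.List.pyRange 1 (b.length) 1).foldl
      (fun d i => pvInc d (PySem.List.pyGetD b (i - 1) "", PySem.List.pyGetD b i "")) d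
    = pvCnt d (pvChain b) := by
  rw [PySem.List.pyRange_one, List.foldl_map]
  have hlen : ((b.length : Int) - 1).toNat = b.length - 1 := by omega
  rw [hlen]
  rw [pvFoldlCongr _ _ (fun d k => pvInc d (b.getD k "", b.getD (k + 1) "")) d ?_]
  · exact pvNatChain b d
  · intro acc k
    have e1 : (1 : Int) + (k : Int) - 1 = ((k : Nat) : Int) := by omega
    have e2 : (1 : Int) + (k : Int) = ((k + 1 : Nat) : Int) := by omega
    rw [e1, e2, PySem.List.pyGetD_natCast, PySem.List.pyGetD_natCast]

-- A's whole loop, started from a dict and a pending-source state, counts pvStream of the non-empty blocks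
theorem pvA_loop_eq (bb_vars : List (String × List String)) (seq : List String)
    (d : PySem.Dict (String × String) Int) (last : Option String) :
    (seq.foldl (pvStepA bb_vars) (d, match last with | none => [] | some s => [s])).1
    = pvCnt d (pvStream last ((seq.map (fun bb => (PySem.Dict.mk bb_vars).getD bb [])).filter (fun b => !b.isEmpty))) := by
  induction seq generalizing d last with
  | nil => simp [pvCnt, pvStream]
  | cons bb rest ih =>
    simp only [List.foldl_cons, List.map_cons, List.filter_cons]
    by_cases hE : ((PySem.Dict.mk bb_vars).getD bb []).isEmpty
    · have hstep : pvStepA bb_vars (d, match last with | none => [] | some s => [s]) bb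
          = (d, match last with | none => [] | some s => [s]) := by
        simp [pvStepA, hE]
      rw [hstep, ih]
      simp [hE]
    · -- non-empty block b
      set b := (PySem.Dict.mk bb_vars).getD bb [] with hb
      have hbne : b ≠ [] := by
        intro h; rw [h] at hE; simp at hE
      have hslice : PySem.List.slice b (some (-1)) none = [b.getLast hbne] := by
        rw [PySem.List.slice_from_neg_one, List.drop_length_sub_one hbne]
      have hlast? : b.getLast? = some (b.getLast hbne) := List.getLast?_eq_some_getLast hbne
      have hlastb : ([b.getLast hbne] : List String)
          = (match b.getLast? with | none => [] | some s => [s]) := by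
        rw [hlast?]
      simp only [hE, Bool.not_false, if_true]
      cases last with
      | none =>
        have hstep : pvStepA bb_vars (d, ([] : List String)) bb
            = (pvCnt d (pvChain b), [b.getLast hbne]) := by
          simp only [pvStepA, ← hb, hE]
          simp only [Bool.false_eq_true, if_false, List.isEmpty_nil, if_true]
          rw [pvIndexLoop_eq_chain, hslice]
        rw [hstep, hlastb, ih]
        simp [pvStream, pvCnt_append]
      | some s =>
        have hstep : pvStepA bb_vars (d, [s]) bb
            = (pvCnt d (b.map (fun t => (s, t)) ++ pvChain b), [b.getLast hbne]) := by
          simp only [pvStepA, ← hb, hE]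
          simp only [Bool.false_eq_true, if_false, List.isEmpty_cons, List.foldl_cons, List.foldl_nil]
          have hcross : b.foldl (fun d dest => pvInc d (s, dest)) d
              = pvCnt d (b.map (fun t => (s, t))) := by
            simp [pvCnt, List.foldl_map]
          rw [hcross, pvIndexLoop_eq_chain, hslice, pvCnt_append]
        rw [hstep, hlastb, ih]
        simp [pvStream, pvCnt_append]

-- ----- counter-merge machinery for the B side -----

-- two inserts at distinct keys commute when the second key is already present
theorem pvInsertSwap (d : PySem.Dict (String × String) Int) (e k : String × String)
    (v w : Int) (he : d.contains e = true) (hk : k ≠ e) :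
    (d.insert k w).insert e v = (d.insert e v).insert k w := by
  by_cases hck : d.contains k = true
  · have h1 : (d.insert k w).contains e = true := by
      rw [PySem.Dict.contains_insert]; simp [he]
    have h2 : (d.insert e v).contains k = true := by
      rw [PySem.Dict.contains_insert]; simp [hck]
    apply PySem.Dict.ext
    rw [PySem.Dict.items_insert_of_contains _ v h1, PySem.Dict.items_insert_of_contains _ w hck,
        PySem.Dict.items_insert_of_contains _ w h2, PySem.Dict.items_insert_of_contains _ v he,
        List.map_map, List.map_map]
    apply List.map_congr_left
    intro p _
    simp only [Function.comp]
    by_cases hpk : p.1 = k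
    · have : (p.1 == k) = true := beq_iff_eq.mpr hpk
      have hke : (k == e) = false := beq_eq_false_iff_ne.mpr hk
      have hpe : (p.1 == e) = false := beq_eq_false_iff_ne.mpr (by rw [hpk]; exact hk)
      simp [this, hke, hpe]
    · by_cases hpe : p.1 = e
      · have : (p.1 == e) = true := beq_iff_eq.mpr hpe
        have hek : (e == k) = false := beq_eq_false_iff_ne.mpr (Ne.symm hk)
        have hpk' : (p.1 == k) = false := beq_eq_false_iff_ne.mpr hpk
        simp [this, hek, hpk']
      · simp [beq_eq_false_iff_ne.mpr hpk, beq_eq_false_iff_ne.mpr hpe]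
  · have hck' : d.contains k = false := by
      cases h : d.contains k
      · rfl
      · exact absurd h hck
    have h1 : (d.insert k w).contains e = true := by
      rw [PySem.Dict.contains_insert]; simp [he]
    have h2 : (d.insert e v).contains k = false := by
      rw [PySem.Dict.contains_insert]
      simp [hck', beq_eq_false_iff_ne.mpr hk]
    apply PySem.Dict.ext
    rw [PySem.Dict.items_insert_of_contains _ v h1, PySem.Dict.items_insert_of_not_contains _ w hck',
        PySem.Dict.items_insert_of_not_contains _ w h2, PySem.Dict.items_insert_of_contains _ v he,
        List.map_append]
    simp only [List.map_cons, List.map_nil, beq_eq_false_iff_ne.mpr hk]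
    simp


-- modify at distinct keys commutes when e is already present
theorem pvModifySwap (d : PySem.Dict (String × String) Int) (e k : String × String)
    (f g : Int → Int) (he : d.contains e = true) (hk : k ≠ e) :
    (d.modify k 0 g).modify e 0 f = (d.modify e 0 f).modify k 0 g := by
  simp only [PySem.Dict.modify]
  rw [PySem.Dict.getD_insert_of_ne _ _ _ (Ne.symm hk), PySem.Dict.getD_insert_of_ne _ _ _ hk]
  exact pvInsertSwap d e k _ _ he hk


-- two modifies at the SAME key compose
theorem pvModifyCompose (d : PySem.Dict (String × String) Int) (e : String × String) (a b : Int) :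
    (d.modify e 0 (· + a)).modify e 0 (· + b) = d.modify e 0 (· + (a + b)) := by
  simp only [PySem.Dict.modify]
  rw [PySem.Dict.getD_insert_self, PySem.Dict.insert_insert_self]
  ring_nf


-- a modify at a present key e pushes through a fold of modifies at other keys
theorem pvPull (ps : List ((String × String) × Int)) (d : PySem.Dict (String × String) Int)
    (e : String × String) (f : Int → Int) (he : d.contains e = true)
    (hne : ∀ q ∈ ps, q.1 ≠ e) :
    ps.foldl (fun d p => d.modify p.1 0 (· + p.2)) (d.modify e 0 f)
    = (ps.foldl (fun d p => d.modify p.1 0 (· + p.2)) d).modify e 0 f := by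
  induction ps generalizing d with
  | nil => rfl
  | cons q rest ih =>
    simp only [List.foldl_cons]
    rw [← pvModifySwap d e q.1 f (· + q.2) he (hne q (List.mem_cons_self))]
    rw [ih (d.modify q.1 0 (· + q.2)) ?_ (fun p hp => hne p (List.mem_cons_of_mem q hp))]
    simp only [PySem.Dict.modify]
    rw [PySem.Dict.contains_insert]
    simp [he]


-- bumping the count of one present key in an item list before adding it
theorem pvLBump (ps : List ((String × String) × Int)) (d : PySem.Dict (String × String) Int)
    (e : String × String) (v : Int) (hnd : (ps.map Prod.fst).Nodup) (hmem : (e, v) ∈ ps) :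
    (ps.map (fun p => if p.1 == e then (e, v + 1) else p)).foldl (fun d p => d.modify p.1 0 (· + p.2)) d
    = (ps.foldl (fun d p => d.modify p.1 0 (· + p.2)) d).modify e 0 (· + 1) := by
  induction ps generalizing d with
  | nil => exact absurd hmem (List.not_mem_nil)
  | cons p rest ih =>
    simp only [List.map_cons, List.nodup_cons] at hnd ⊢
    obtain ⟨hhead, htail⟩ := hnd
    by_cases hpe : p.1 = e
    · have hp : p = (e, v) := by
        rcases List.mem_cons.mp hmem with h | h
        · exact h.symm
        · exact absurd (by rw [hpe]; exact List.mem_map.mpr ⟨(e, v), h, rfl⟩) hhead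
      subst hp
      simp only [BEq.rfl, if_true, List.foldl_cons]
      have htl : rest.map (fun p => if (p.1 == e) = true then (e, v + 1) else p) = rest := by
        conv_rhs => rw [← List.map_id rest]
        apply List.map_congr_left
        intro q hq
        have hqne : q.1 ≠ e := by
          intro hqe
          exact hhead (List.mem_map.mpr ⟨q, hq, hqe⟩)
        simp [beq_eq_false_iff_ne.mpr hqne]
      simp only at htl
      rw [htl]
      rw [← pvPull rest (d.modify e 0 (· + v)) e (· + 1) ?_ ?_]
      · rw [pvModifyCompose]
      · simp only [PySem.Dict.modify]
        exact PySem.Dict.contains_insert_self _ _ _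
      · intro q hq hqe
        exact hhead (List.mem_map.mpr ⟨q, by simp [hq], hqe⟩)
    · have hmem' : (e, v) ∈ rest := by
        rcases List.mem_cons.mp hmem with h | h
        · exact absurd (by rw [← h]) hpe
        · exact h
      simp only [beq_eq_false_iff_ne.mpr hpe, List.foldl_cons]
      exact ih (d.modify p.1 0 (· + p.2)) htail hmem'


theorem pvNodupCnt (d : PySem.Dict (String × String) Int) (es : List (String × String))
    (h : d.keys.Nodup) : (pvCnt d es).keys.Nodup := by
  induction es generalizing d with
  | nil => exact h
  | cons e rest ih =>
    simp only [pvCnt, List.foldl_cons]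
    exact ih _ (by simp only [pvInc, PySem.Dict.modify]; exact PySem.Dict.nodup_keys_insert _ _ _ h)


theorem pvBump (d c : PySem.Dict (String × String) Int) (e : String × String)
    (hnd : c.keys.Nodup) : pvAdd d (pvInc c e) = pvInc (pvAdd d c) e := by
  by_cases hc : c.contains e = true
  · have hsome : (c.get? e).isSome := by rw [← PySem.Dict.contains_eq_isSome_get?]; exact hc
    obtain ⟨w, hw⟩ := Option.isSome_iff_exists.mp hsome
    have hvd : c.getD e 0 = w := PySem.Dict.getD_of_get?_eq_some _ _ hw
    have hmem : (e, c.getD e 0) ∈ c.items := by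
      rw [hvd]; exact PySem.Dict.mem_items_of_get?_eq_some _ hw
    have hnd' : (c.items.map Prod.fst).Nodup := hnd
    simp only [pvAdd, pvInc, PySem.Dict.modify]
    rw [PySem.Dict.items_insert_of_contains _ _ hc]
    exact pvLBump c.items d e (c.getD e 0) hnd' hmem
  · have hc' : c.contains e = false := by
      cases h : c.contains e
      · rfl
      · exact absurd h hc
    simp only [pvAdd, pvInc, PySem.Dict.modify]
    rw [PySem.Dict.getD_of_not_contains _ _ hc']
    rw [PySem.Dict.items_insert_of_not_contains _ _ hc']
    rw [List.foldl_append]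
    norm_num


-- Counter addition is the same as counting the second stream on top of the first dict
theorem pvAbs (fs : List (String × String)) (d : PySem.Dict (String × String) Int) :
    pvAdd d (pvCnt PySem.Dict.empty fs) = pvCnt d fs := by
  induction fs using List.reverseRecOn with
  | nil => rfl
  | append_singleton es e ih =>
    have h1 : pvCnt PySem.Dict.empty (es ++ [e]) = pvInc (pvCnt PySem.Dict.empty es) e := by
      simp [pvCnt, List.foldl_append]
    have h2 : pvCnt d (es ++ [e]) = pvInc (pvCnt d es) e := by
      simp [pvCnt, List.foldl_append]
    rw [h1, h2, pvBump d _ e (pvNodupCnt _ _ PySem.Dict.nodup_keys_empty), ih]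


-- ----- stream-splitting machinery -----

theorem pvStream_append (M L2 : List (List String)) (last : Option String) :
    pvStream last (M ++ L2)
    = pvStream last M ++ pvStream (match M.getLast? with | none => last | some m => m.getLast?) L2 := by
  induction M generalizing last with
  | nil => simp [pvStream]
  | cons c cs ih =>
    simp only [List.cons_append, pvStream]
    rw [ih]
    cases cs with
    | nil => simp [pvStream, List.append_assoc]
    | cons c' cs' =>
      have hne' : (c' :: cs') ≠ [] := by simp
      rw [List.getLast?_cons_cons, List.getLast?_eq_some_getLast hne']
      simp [pvStream, List.append_assoc]


theorem pvStreamH_append (M L2 : List (List String)) (hM : M ≠ []) :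
    pvStreamH (M ++ L2) = pvStreamH M ++ pvStream (M.getLast hM).getLast? L2 := by
  cases M with
  | nil => exact absurd rfl hM
  | cons c cs =>
    simp only [List.cons_append, pvStreamH]
    rw [pvStream_append cs L2 c.getLast?]
    cases hcs : cs.getLast? with
    | none =>
      have hnil : cs = [] := List.getLast?_eq_none_iff.mp hcs
      subst hnil
      simp [pvStream]
    | some m =>
      have hcsne : cs ≠ [] := by intro h; rw [h] at hcs; simp at hcs
      have h1 : (c :: cs).getLast hM = cs.getLast hcsne := List.getLast_cons hcsne
      have h2 : m = cs.getLast hcsne := by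
        rw [List.getLast?_eq_some_getLast hcsne] at hcs
        exact (Option.some.inj hcs).symm
      rw [h1, ← h2, List.append_assoc]


-- solve(lo,hi) counts exactly the stream of the block segment
theorem pvSolve_eq (blocks : List (List String)) (hne : ∀ b ∈ blocks, b ≠ []) :
    ∀ (n lo hi : Nat), hi - lo = n → lo < hi → hi ≤ blocks.length →
    pvSolve blocks lo hi = pvCnt PySem.Dict.empty (pvStreamH ((blocks.drop lo).take (hi - lo))) := by
  intro n
  induction n using Nat.strong_induction_on with
  | _ n ih =>
    intro lo hi hn hlt hle
    by_cases hbase : hi ≤ lo + 1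
    · -- base: hi = lo + 1, a single block
      have hhi : hi = lo + 1 := by omega
      have hlo : lo < blocks.length := by omega
      have hdrop : blocks.drop lo = blocks[lo] :: blocks.drop (lo + 1) := List.drop_eq_getElem_cons hlo
      have hgetD : blocks.getD lo [] = blocks[lo] := List.getD_eq_getElem blocks [] hlo
      have hone : lo + 1 - lo = 1 := by omega
      have hseg : List.take (lo + 1 - lo) (List.drop lo blocks) = [blocks[lo]] := by
        rw [hone, hdrop, List.take_succ_cons, List.take_zero]
      rw [pvSolve, dif_pos hbase, hhi, hgetD, hseg]
      simp [pvStreamH, pvStream, pvCnt, pvChain, PySem.Dict.counter]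
      rfl
    · have h2 : lo + 2 ≤ hi := by omega
      have hm1 : lo < (lo + hi) / 2 := by omega
      have hm2 : (lo + hi) / 2 < hi := by omega
      set mid := (lo + hi) / 2 with hmid
      have hunfold : pvSolve blocks lo hi
          = pvAdd (((blocks.getD mid []).map
              (fun dest => (PySem.List.pyGetD (blocks.getD (mid - 1) []) (-1) "", dest))).foldl
              (fun d e => d.modify e 0 (· + 1))
              (pvSolve blocks lo mid))
            (pvSolve blocks mid hi) := by
        rw [pvSolve, dif_neg hbase]
      have ihl := ih (mid - lo) (by omega) lo mid rfl hm1 (by omega)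
      have ihr := ih (hi - mid) (by omega) mid hi rfl hm2 hle
      rw [hunfold, ihl, ihr]
      -- name the two stream segments
      set S1 := pvStreamH ((blocks.drop lo).take (mid - lo)) with hS1
      set S2 := pvStreamH ((blocks.drop mid).take (hi - mid)) with hS2
      set cross := ((blocks.getD mid []).map
          (fun dest => (PySem.List.pyGetD (blocks.getD (mid - 1) []) (-1) "", dest))) with hcrossdef
      have hfold : cross.foldl (fun d e => d.modify e 0 (· + 1)) (pvCnt PySem.Dict.empty S1)
          = pvCnt PySem.Dict.empty (S1 ++ cross) := by
        rw [pvCnt_append]; rfl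
      rw [hfold, pvAbs, ← pvCnt_append]
      congr 1
      -- now a pure stream identity
      have hmidlt : mid < blocks.length := by omega
      have hseg : (blocks.drop lo).take (hi - lo)
          = (blocks.drop lo).take (mid - lo) ++ (blocks.drop mid).take (hi - mid) := by
        rw [show hi - lo = (mid - lo) + (hi - mid) from by omega, List.take_add, List.drop_drop,
            show lo + (mid - lo) = mid from by omega]
      set M := (blocks.drop lo).take (mid - lo) with hM
      have hMlen : M.length = mid - lo := by
        rw [hM, List.length_take, List.length_drop]
        omega
      have hMne : M ≠ [] := by
        apply List.ne_nil_of_length_pos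
        omega
      have hL2 : ∃ rest, (blocks.drop mid).take (hi - mid) = blocks[mid] :: rest := by
        obtain ⟨k, hk⟩ : ∃ k, hi - mid = k + 1 := ⟨hi - mid - 1, by omega⟩
        exact ⟨(blocks.drop (mid + 1)).take k,
          by rw [hk, List.drop_eq_getElem_cons hmidlt, List.take_succ_cons]⟩
      -- the last block of the left segment is blocks[mid-1]
      have hm1lt : mid - 1 < blocks.length := by omega
      have hMlast : M.getLast hMne = blocks[mid - 1] := by
        have h1 : some (M.getLast hMne) = M[M.length - 1]? := by
          rw [← List.getLast?_eq_getElem?, List.getLast?_eq_some_getLast hMne]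
        have hgo : M[M.length - 1]? = some blocks[mid - 1] := by
          rw [hMlen]
          conv_lhs => rw [hM]
          rw [List.getElem?_take_of_lt (by omega), List.getElem?_drop,
              show lo + (mid - lo - 1) = mid - 1 from by omega,
              List.getElem?_eq_getElem hm1lt]
        exact Option.some.inj (h1.trans hgo)
      have hbne : blocks[mid - 1] ≠ [] := hne _ (List.getElem_mem hm1lt)
      obtain ⟨rest, hL2⟩ := hL2
      rw [hseg, pvStreamH_append M _ hMne, hMlast, List.getLast?_eq_some_getLast hbne, hL2]
      rw [hcrossdef, List.getD_eq_getElem blocks [] hmidlt, List.getD_eq_getElem blocks [] hm1lt,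
          PySem.List.pyGetD_neg_one _ "" hbne]
      obtain ⟨m, ms, hM'⟩ : ∃ m ms, M = m :: ms := by
        cases hMc : M with
        | nil => exact absurd hMc hMne
        | cons a b => exact ⟨a, b, rfl⟩
      rw [hS1, hS2, hL2, hM']
      simp [pvStreamH, pvStream, List.append_assoc]


-- re-inserting the items of a nodup-keyed dict into an empty dict reproduces its items
theorem pvReinsert (c : PySem.Dict (String × String) Int) (hnd : c.keys.Nodup) :
    (c.items.foldl (fun d p => d.insert p.1 p.2) (PySem.Dict.empty : PySem.Dict (String × String) Int)).items
    = c.items := by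
  have h1 : ∀ p ∈ c.items, (PySem.Dict.empty : PySem.Dict (String × String) Int).contains p.1 = false := by
    intro p _
    rfl
  have h2 : (c.items.map (fun p => p.1)).Nodup := hnd
  have := PySem.Dict.items_foldl_insert_fresh c.items (fun p => p.1) (fun p => p.2) PySem.Dict.empty h1 h2
  simpa using this


-- both ports compute the count of the same stream
theorem pvMain (bb_vars : List (String × List String)) (exec_sequence : List String) :
    build_variable_graph bb_vars exec_sequence = build_variable_graph_alt bb_vars exec_sequence := by
  simp only [build_variable_graph, build_variable_graph_alt]
  have hA := pvA_loop_eq bb_vars exec_sequence PySem.Dict.empty none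
  simp only at hA
  rw [hA]
  set blocks := (exec_sequence.map (fun bb => (PySem.Dict.mk bb_vars).getD bb [])).filter (fun b => !b.isEmpty) with hblocks
  have hne : ∀ b ∈ blocks, b ≠ [] := by
    intro b hb
    have := List.of_mem_filter hb
    simpa using this
  clear_value blocks
  cases blocks with
  | nil => simp [pvStream, pvCnt]
  | cons b0 bs =>
    have hlen : 0 < (b0 :: bs).length := by simp
    have hsolve := pvSolve_eq (b0 :: bs) hne ((b0 :: bs).length) 0 ((b0 :: bs).length) rfl hlen (le_refl _)
    simp only [List.drop_zero, Nat.sub_zero, List.take_length] at hsolve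
    simp only [List.isEmpty_cons, if_false, Bool.false_eq_true]
    rw [hsolve]
    have hstream : pvStream none (b0 :: bs) = pvStreamH (b0 :: bs) := by
      simp [pvStream, pvStreamH]
    rw [hstream, pvReinsert _ (pvNodupCnt _ _ PySem.Dict.nodup_keys_empty)]


-- ===== VERDICT (by name: the statement is the Claim_ definition above) =====
theorem build_variable_graph_spec : Claim_equal_build_variable_graph := by
  intro bb_vars exec_sequence _
  unfold Spec_build_variable_graph
  exact pvMain bb_vars exec_sequence
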